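-- pv_equiv track=rewrite | github.com/Sh-Kod/Server-Neustart | cinema_reboot/telegram_controller.py | _parse_days_input
-- ===== SOURCE A (Python) =====
-- from typing import Optional
--
-- _DAYS_MAP = {
--     "1": "Mo", "mo": "Mo", "montag": "Mo",
--     "2": "Di", "di": "Di", "dienstag": "Di",
--     "3": "Mi", "mi": "Mi", "mittwoch": "Mi",
--     "4": "Do", "do": "Do", "donnerstag": "Do",
--     "5": "Fr", "fr": "Fr", "freitag": "Fr",
--     "6": "Sa", "sa": "Sa", "samstag": "Sa",
--     "7": "So", "so": "So", "sonntag": "So",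
-- }
--
-- def _parse_days_input(text: str) -> Optional[list]:
--     """Parst Tages-Eingabe → sortierte Kurzliste oder None."""
--     raw = [p.strip().lower() for p in text.replace(";", ",").split(",")]
--     order = ["Mo", "Di", "Mi", "Do", "Fr", "Sa", "So"]
--     result = []
--     for part in raw:
--         found = _DAYS_MAP.get(part)
--         if found is None:
--             return None
--         if found not in result:
--             result.append(found)
--     # In Wochentag-Reihenfolge sortieren
--     result.sort(key=lambda d: order.index(d))
--     return result if result else None
-- ===== SOURCE B (Python) =====
-- from typing import Optional
--
-- _DAYS_MAP = {
--     "1": "Mo", "mo": "Mo", "montag": "Mo",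
--     "2": "Di", "di": "Di", "dienstag": "Di",
--     "3": "Mi", "mi": "Mi", "mittwoch": "Mi",
--     "4": "Do", "do": "Do", "donnerstag": "Do",
--     "5": "Fr", "fr": "Fr", "freitag": "Fr",
--     "6": "Sa", "sa": "Sa", "samstag": "Sa",
--     "7": "So", "so": "So", "sonntag": "So",
-- }
--
-- _ORDER = ["Mo", "Di", "Mi", "Do", "Fr", "Sa", "So"]
--
-- def _parse_days_input(text: str) -> Optional[list]:
--     """Parst Tages-Eingabe -> sortierte Kurzliste oder None."""
--     codes = set()
--     for part in text.replace(";", ",").split(","):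
--         found = _DAYS_MAP.get(part.strip().lower())
--         if found is None:
--             return None
--         codes.add(found)
--     return [d for d in _ORDER if d in codes]
-- ===== Notes on version B (the rewrite author's own statement) =====
-- stated objective: idiomatic
-- what changed: B collects the matched short codes into a set and builds the result by one filtering pass over the fixed weekday order, replacing A's dedup-by-membership list, .sort with an order.index key, and the dead empty-result guard.
import Mathlib
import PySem

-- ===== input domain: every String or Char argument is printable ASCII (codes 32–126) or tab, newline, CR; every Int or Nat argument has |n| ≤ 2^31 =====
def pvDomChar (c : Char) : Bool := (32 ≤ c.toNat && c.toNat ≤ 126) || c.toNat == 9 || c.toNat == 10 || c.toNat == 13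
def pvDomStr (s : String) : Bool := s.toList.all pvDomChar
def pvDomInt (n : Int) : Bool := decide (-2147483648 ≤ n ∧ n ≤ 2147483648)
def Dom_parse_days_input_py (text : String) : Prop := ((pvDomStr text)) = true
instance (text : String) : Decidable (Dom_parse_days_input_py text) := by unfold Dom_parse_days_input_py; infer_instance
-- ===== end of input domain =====

-- B collects the matched short codes into a set and emits them by one filtering pass over the fixed
-- weekday order, replacing A's list-dedup, .sort with an order.index key, and the dead empty guard (idiomatic).

-- ===== PORT A =====
def pvDaysMap : PySem.Dict String String := PySem.Dict.ofList
  [("1", "Mo"), ("mo", "Mo"), ("montag", "Mo"),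
   ("2", "Di"), ("di", "Di"), ("dienstag", "Di"),
   ("3", "Mi"), ("mi", "Mi"), ("mittwoch", "Mi"),
   ("4", "Do"), ("do", "Do"), ("donnerstag", "Do"),
   ("5", "Fr"), ("fr", "Fr"), ("freitag", "Fr"),
   ("6", "Sa"), ("sa", "Sa"), ("samstag", "Sa"),
   ("7", "So"), ("so", "So"), ("sonntag", "So")]

def pvOrder : List String := ["Mo", "Di", "Mi", "Do", "Fr", "Sa", "So"]

-- the 'for part in raw' loop of A, with its early 'return None'
def pvLoopA : List String → List String → Option (List String)
  | [], result => some result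
  | part :: rest, result =>
      match pvDaysMap.get? part with
      | none => none
      | some found => pvLoopA rest (if found ∈ result then result else result ++ [found])

def parse_days_input_py (text : String) : Option (List String) :=
  -- ',' is a nonempty literal separator, so split? is always some: getD [] is exact
  match pvLoopA (((PySem.Str.split? (PySem.Str.replace text ";" ",") ",").getD []).map
      (fun p => PySem.Str.lower (PySem.Str.strip p))) [] with
  | none => none
  | some result =>
      -- result.sort(key=order.index): index never raises here (every code is in pvOrder), getD 0 is exact
      if PySem.List.sorted result (fun d => (PySem.List.index? pvOrder d).getD 0) false = []
      then none
      else some (PySem.List.sorted result (fun d => (PySem.List.index? pvOrder d).getD 0) false)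

-- ===== PORT B =====
-- the validation loop of Source B, accumulating a set of codes
def pvLoopB : List String → PySem.Set String → Option (PySem.Set String)
  | [], codes => some codes
  | part :: rest, codes =>
      match pvDaysMap.get? (PySem.Str.lower (PySem.Str.strip part)) with
      | none => none
      | some found => pvLoopB rest (codes.add found)

def parse_days_input_py_alt (text : String) : Option (List String) :=
  -- ',' is a nonempty literal separator, so split? is always some: getD [] is exact
  match pvLoopB ((PySem.Str.split? (PySem.Str.replace text ";" ",") ",").getD []) [] with
  | none => none
  | some codes => some (pvOrder.filter (fun d => decide (d ∈ codes)))

-- ===== PRECONDITION & SPEC =====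
def Spec_parse_days_input_py (text : String) (out : Option (List String)) : Prop := out = parse_days_input_py_alt text
instance (text : String) (out : Option (List String)) : Decidable (Spec_parse_days_input_py text out) := by unfold Spec_parse_days_input_py; infer_instance

-- ===== CLAIM (what is proved, stated in full; the proofs are below) =====
def Claim_equal_parse_days_input_py : Prop := ∀ (text : String), Dom_parse_days_input_py text → Spec_parse_days_input_py text (parse_days_input_py text)

-- ===== LEMMAS AND PROOFS =====

-- every value a dict lookup can return is among the dict's values
lemma pvGet?_mem_values (d : PySem.Dict String String) (p f : String)
    (h : d.get? p = some f) : f ∈ d.values := by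
  obtain ⟨items⟩ := d
  induction items with
  | nil => simp [PySem.Dict.get?] at h
  | cons kv rest ih =>
    obtain ⟨k, v⟩ := kv
    rw [PySem.Dict.get?_mk_cons] at h
    by_cases hk : k == p
    · simp [hk] at h
      simp [PySem.Dict.values, h]
    · simp [hk] at h
      have := ih h
      simp [PySem.Dict.values] at this ⊢
      right; exact this

-- every value of the days map lies in pvOrder
lemma pvDaysMap_val_mem_order (p f : String) (h : pvDaysMap.get? p = some f) : f ∈ pvOrder := by
  have hall : ∀ g ∈ pvDaysMap.values, g ∈ pvOrder := by decide
  exact hall f (pvGet?_mem_values pvDaysMap p f h)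

-- the two loops run in lockstep: B over the raw parts, A over their normalised forms
lemma pvLoop_agree (parts : List String) (acc : List String) :
    pvLoopA (parts.map (fun p => PySem.Str.lower (PySem.Str.strip p))) acc
      = pvLoopB parts acc := by
  induction parts generalizing acc with
  | nil => rfl
  | cons p rest ih =>
    simp only [List.map_cons, pvLoopA, pvLoopB]
    cases h : pvDaysMap.get? (PySem.Str.lower (PySem.Str.strip p)) with
    | none => rfl
    | some found =>
      have hadd : (if found ∈ acc then acc else acc ++ [found])
          = PySem.Set.add acc found := by
        simp [PySem.Set.add, List.contains_eq_mem]
      simp only [hadd]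
      exact ih _

-- a successful B-loop keeps the accumulator as a prefix of the result
lemma pvLoopB_prefix (parts : List String) (acc : PySem.Set String) (r : PySem.Set String)
    (h : pvLoopB parts acc = some r) : (acc : List String) <+: (r : List String) := by
  induction parts generalizing acc with
  | nil =>
    simp [pvLoopB] at h
    exact h ▸ List.prefix_refl _
  | cons p rest ih =>
    simp only [pvLoopB] at h
    cases hg : pvDaysMap.get? (PySem.Str.lower (PySem.Str.strip p)) with
    | none => simp [hg] at h
    | some found =>
      rw [hg] at h
      refine List.IsPrefix.trans ?_ (ih _ h)
      by_cases hm : found ∈ (acc : List String) <;>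
        simp [PySem.Set.add, List.contains_eq_mem, hm, List.prefix_append]

-- a successful B-loop returns a nodup list of codes from pvOrder
lemma pvLoopB_inv (parts : List String) (acc : PySem.Set String)
    (hnd : List.Nodup (acc : List String)) (hsub : ∀ x ∈ (acc : List String), x ∈ pvOrder)
    (r : PySem.Set String) (h : pvLoopB parts acc = some r) :
    List.Nodup (r : List String) ∧ (∀ x ∈ (r : List String), x ∈ pvOrder) := by
  induction parts generalizing acc with
  | nil =>
    simp [pvLoopB] at h
    exact h ▸ ⟨hnd, hsub⟩
  | cons p rest ih =>
    simp only [pvLoopB] at h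
    cases hg : pvDaysMap.get? (PySem.Str.lower (PySem.Str.strip p)) with
    | none => simp [hg] at h
    | some found =>
      rw [hg] at h
      refine ih (acc.add found) (PySem.Set.nodup_add acc found hnd) ?_ h
      intro x hx
      rcases (PySem.Set.mem_add acc found x).mp hx with hx' | hx'
      · exact hsub x hx'
      · exact hx' ▸ pvDaysMap_val_mem_order _ _ hg

-- sorting by position in pvOrder = filtering pvOrder by membership (for nodup sublists of codes)
lemma pv_sorted_eq_filter (r : List String) (hnd : r.Nodup) (hsub : ∀ x ∈ r, x ∈ pvOrder) :
    PySem.List.sorted r (fun d => (PySem.List.index? pvOrder d).getD 0) false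
      = pvOrder.filter (fun d => decide (d ∈ r)) := by
  apply PySem.List.sorted_eq_of_perm_of_pairwise_lt
  · rw [List.perm_ext_iff_of_nodup (List.Nodup.filter _ (by decide)) hnd]
    intro a
    simp only [List.mem_filter, decide_eq_true_eq]
    exact ⟨fun ⟨_, ha⟩ => ha, fun ha => ⟨hsub a ha, ha⟩⟩
  · exact List.Pairwise.filter _ (by decide)

-- Python's split on a nonempty separator never returns the empty list
lemma pv_splitOn_go_ne_nil (sep : List Char) (fuel : Nat) (l cur : List Char)
    (acc : List (List Char)) : PySem.Chars.splitOn.go sep fuel l cur acc ≠ [] := by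
  induction fuel generalizing l cur acc with
  | zero => simp [PySem.Chars.splitOn.go]
  | succ n ih =>
    cases l with
    | nil => simp [PySem.Chars.splitOn.go]
    | cons c rest =>
      rw [PySem.Chars.splitOn.go]
      split
      · exact ih _ _ _
      · exact ih _ _ _

lemma pv_split_ne_nil (s : String) : (PySem.Str.split? s ",").getD [] ≠ [] := by
  have hb := PySem.Str.split?_map s ","
  cases hs : PySem.Str.split? s "," with
  | none =>
    rw [hs] at hb
    simp [PySem.Chars.split?] at hb
  | some parts =>
    rw [hs] at hb
    simp only [Option.map_some, PySem.Chars.split?] at hb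
    norm_num at hb
    have h2 : parts.map String.toList ≠ [] := by
      rw [hb.2, PySem.Chars.splitOn]
      exact pv_splitOn_go_ne_nil _ _ _ _ _
    simpa using h2

-- ===== VERDICT (by name: the statement is the Claim_ definition above) =====
theorem parse_days_input_py_spec : Claim_equal_parse_days_input_py := by
  intro text _
  unfold Spec_parse_days_input_py parse_days_input_py parse_days_input_py_alt
  set parts := (PySem.Str.split? (PySem.Str.replace text ";" ",") ",").getD [] with hparts
  rw [pvLoop_agree parts []]
  cases h : pvLoopB parts [] with
  | none => rfl
  | some r =>
    simp only []
    obtain ⟨hnd, hsub⟩ := pvLoopB_inv parts [] (by simp) (by simp) r h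
    have hrne : (r : List String) ≠ [] := by
      cases hp : parts with
      | nil =>
        rw [hp] at hparts
        exact absurd hparts.symm (pv_split_ne_nil _)
      | cons p rest =>
        rw [hp] at h
        simp only [pvLoopB] at h
        cases hg : pvDaysMap.get? (PySem.Str.lower (PySem.Str.strip p)) with
        | none => simp [hg] at h
        | some found =>
          rw [hg] at h
          have hpre := pvLoopB_prefix rest _ r h
          intro hre
          rw [hre] at hpre
          have := List.eq_nil_of_prefix_nil hpre
          simp [PySem.Set.add] at this
    have hfne : pvOrder.filter (fun d => decide (d ∈ (r : List String))) ≠ [] := by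
      rw [← pv_sorted_eq_filter r hnd hsub]
      simpa [PySem.List.sorted_eq_nil_iff] using hrne
    rw [pv_sorted_eq_filter r hnd hsub, if_neg hfne]
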